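-- pv_equiv track=rewrite | github.com/npbauman/SymGen | Utilities.py | remove_last_star
-- ===== SOURCE A (Python) =====
-- def remove_last_star(string):
--     # Find the index of the last non-whitespace character
--     last_non_whitespace_index = None
--     for i in range(len(string) - 1, -1, -1):
--         if string[i] != ' ':
--             last_non_whitespace_index = i
--             break
--
--     # Check if the last non-whitespace character is "*"
--     if last_non_whitespace_index is not None and string[last_non_whitespace_index] == '*':
--         # Remove the "*" character
--         string = string[:last_non_whitespace_index] + string[last_non_whitespace_index + 1:]
--
--     return string
-- ===== SOURCE B (Python) =====
-- def remove_last_star(string):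
--     # Forward scan: delete the (unique) '*' whose entire suffix consists of spaces.
--     for i, ch in enumerate(string):
--         if ch == '*' and all(c == ' ' for c in string[i+1:]):
--             return string[:i] + string[i+1:]
--     return string
-- ===== Notes on version B (the rewrite author's own statement) =====
-- stated objective: alternative
-- what changed: Instead of scanning backward for the last non-space index and conditionally deleting it, B scans forward and deletes the first '*' whose whole suffix is spaces (such a star is unique, and it is exactly the last non-space character when it exists).
import Mathlib
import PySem

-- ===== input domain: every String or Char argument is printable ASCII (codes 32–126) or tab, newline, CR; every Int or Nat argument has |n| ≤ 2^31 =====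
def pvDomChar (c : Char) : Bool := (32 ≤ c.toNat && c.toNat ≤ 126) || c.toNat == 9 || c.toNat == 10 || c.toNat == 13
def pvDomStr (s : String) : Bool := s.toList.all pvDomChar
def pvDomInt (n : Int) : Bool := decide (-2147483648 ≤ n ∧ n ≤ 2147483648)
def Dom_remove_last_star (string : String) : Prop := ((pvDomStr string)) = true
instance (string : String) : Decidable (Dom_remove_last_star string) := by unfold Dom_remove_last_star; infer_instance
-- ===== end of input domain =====

-- B replaces A's backward scan for the last non-space index by a forward scan that
-- deletes the first '*' whose whole suffix is spaces (that star is unique and is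
-- exactly the last non-space character when it exists); same result, different traversal.

-- ===== PORT A =====
-- for i in range(len(string)-1, -1, -1): if string[i] != ' ': last_non_whitespace_index = i; break
-- (the range yields exactly the indices len-1, …, 0, all in range, so plain getD is exact here)
def rlsFind (cs : List Char) : Nat → Option Nat
  | 0 => none
  | n + 1 => if cs.getD n ' ' ≠ ' ' then some n else rlsFind cs n

def remove_last_star (string : String) : String :=
  match rlsFind string.toList string.toList.length with
  | some i =>
      if string.toList.getD i ' ' = '*' then
        -- string[:i] + string[i+1:]  (0 ≤ i < len, so take/drop are exact)
        String.ofList (string.toList.take i ++ string.toList.drop (i + 1))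
      else string
  | none => string

-- ===== PORT B =====
-- for i, ch in enumerate(string): if ch == '*' and all(c == ' ' for c in string[i+1:]):
--     return string[:i] + string[i+1:]      -- here string[:i] is the untouched prefix,
-- return string                             -- realised by consing the scanned chars back on
def bScan : List Char → List Char
  | [] => []
  | c :: rest => if c = '*' ∧ rest.all (fun x => x == ' ') then rest else c :: bScan rest

def remove_last_star_alt (string : String) : String :=
  String.ofList (bScan string.toList)

-- ===== PRECONDITION & SPEC =====
def Spec_remove_last_star (string : String) (out : String) : Prop := out = remove_last_star_alt string
instance (string : String) (out : String) : Decidable (Spec_remove_last_star string out) := by unfold Spec_remove_last_star; infer_instance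

-- ===== CLAIM (what is proved, stated in full; the proofs are below) =====
def Claim_equal_remove_last_star : Prop := ∀ (string : String), Dom_remove_last_star string → Spec_remove_last_star string (remove_last_star string)

-- ===== LEMMAS AND PROOFS =====

-- list-level mirror of port A
def aList (cs : List Char) : List Char :=
  match rlsFind cs cs.length with
  | some i => if cs.getD i ' ' = '*' then cs.take i ++ cs.drop (i + 1) else cs
  | none => cs

lemma remove_last_star_eq_aList (s : String) :
    remove_last_star s = String.ofList (aList s.toList) := by
  simp only [remove_last_star, aList]
  split
  · split_ifs <;> simp [String.ofList_toList]
  · simp [String.ofList_toList]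

lemma rlsFind_lt (cs : List Char) : ∀ n i, rlsFind cs n = some i → i < n := by
  intro n
  induction n with
  | zero => intro i h; simp [rlsFind] at h
  | succ m ih =>
    intro i h
    unfold rlsFind at h
    split_ifs at h with hc
    · cases h; omega
    · exact Nat.lt_trans (ih i h) (Nat.lt_succ_self m)

lemma rlsFind_concat (ds : List Char) (c : Char) :
    ∀ n, n ≤ ds.length → rlsFind (ds ++ [c]) n = rlsFind ds n := by
  intro n
  induction n with
  | zero => intro _; rfl
  | succ m ih =>
    intro h
    have hm : m < ds.length := by omega
    unfold rlsFind
    rw [List.getD_append _ _ _ _ hm, ih (by omega)]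

lemma aList_space (ds : List Char) : aList (ds ++ [' ']) = aList ds ++ [' '] := by
  unfold aList
  have hlen : (ds ++ [' ']).length = ds.length + 1 := by simp
  rw [hlen]
  have hstep : rlsFind (ds ++ [' ']) (ds.length + 1) = rlsFind ds ds.length := by
    rw [show rlsFind (ds ++ [' ']) (ds.length + 1)
        = if (ds ++ [' ']).getD ds.length ' ' ≠ ' ' then some ds.length
          else rlsFind (ds ++ [' ']) ds.length from rfl]
    rw [List.getD_append_right _ _ _ _ (le_refl ds.length)]
    simp [rlsFind_concat ds ' ' ds.length (le_refl _)]
  rw [hstep]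
  cases h : rlsFind ds ds.length with
  | none => rfl
  | some i =>
    have hi : i < ds.length := rlsFind_lt ds ds.length i h
    dsimp only
    rw [List.getD_append _ _ _ _ hi]
    split_ifs with hstar
    · rw [List.take_append_of_le_length (by omega),
          List.drop_append_of_le_length (by omega), List.append_assoc]
    · rfl

lemma aList_concat (ds : List Char) (c : Char) (hc : c ≠ ' ') :
    aList (ds ++ [c]) = if c = '*' then ds else ds ++ [c] := by
  unfold aList
  have hlen : (ds ++ [c]).length = ds.length + 1 := by simp
  rw [hlen]
  have hget : (ds ++ [c]).getD ds.length ' ' = c := by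
    rw [List.getD_append_right _ _ _ _ (le_refl ds.length)]; simp
  have hfind : rlsFind (ds ++ [c]) (ds.length + 1) = some ds.length := by
    rw [show rlsFind (ds ++ [c]) (ds.length + 1)
        = if (ds ++ [c]).getD ds.length ' ' ≠ ' ' then some ds.length
          else rlsFind (ds ++ [c]) ds.length from rfl]
    rw [hget]; simp [hc]
  rw [hfind]
  dsimp only
  rw [hget]
  split_ifs with hstar
  · rw [List.take_append_of_le_length (le_refl _)]
    simp
  · rfl

lemma bScan_space (ds : List Char) : bScan (ds ++ [' ']) = bScan ds ++ [' '] := by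
  induction ds with
  | nil => simp [bScan]
  | cons d ds ih =>
    simp only [List.cons_append, bScan, List.all_append, List.all_cons, List.all_nil]
    split_ifs with h1 h2 h2
    · rfl
    · exact absurd ⟨h1.1, by simpa using h1.2⟩ h2
    · exact absurd ⟨h2.1, by simp [h2.2]⟩ h1
    · simp [ih]

lemma bScan_concat (ds : List Char) (c : Char) (hc : c ≠ ' ') :
    bScan (ds ++ [c]) = if c = '*' then ds else ds ++ [c] := by
  induction ds with
  | nil => simp [bScan]
  | cons d ds ih =>
    simp only [List.cons_append, bScan, List.all_append, List.all_cons, List.all_nil]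
    have hfalse : (c == ' ') = false := by simpa using hc
    rw [hfalse]
    rw [if_neg (by simp)]
    rw [ih]
    split_ifs <;> simp

lemma list_eq (cs : List Char) : aList cs = bScan cs := by
  induction cs using List.reverseRecOn with
  | nil => rfl
  | append_singleton ds c ih =>
    by_cases hc : c = ' '
    · subst hc; rw [aList_space, bScan_space, ih]
    · rw [aList_concat ds c hc, bScan_concat ds c hc]

-- ===== VERDICT (by name: the statement is the Claim_ definition above) =====
theorem remove_last_star_spec : Claim_equal_remove_last_star := by
  intro s _
  show remove_last_star s = remove_last_star_alt s
  rw [remove_last_star_eq_aList, remove_last_star_alt, list_eq]
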